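-- pv_equiv track=rewrite | github.com/fferradamerino/m32logievo | microensamblador.py | tokenizar_linea
-- ===== SOURCE A (Python) =====
-- def tokenizar_linea(linea):
-- 	tokens = []
-- 	token = ""
--
-- 	for caracter in linea:
-- 		if (caracter == ' ' or caracter == '\t'):
-- 			if len(token) > 0:
-- 				tokens.append(token)
-- 			token = ""
-- 		else:
-- 			token = token + caracter
--
-- 	if len(token) > 0:
-- 		tokens.append(token)
--
-- 	return tokens
-- ===== SOURCE B (Python) =====
-- def tokenizar_linea(linea):
--     # Index-based run scanner: skip separator runs, slice out each maximal
--     # non-separator run in one step (no per-character accumulator).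
--     tokens = []
--     i, n = 0, len(linea)
--     while i < n:
--         if linea[i] in ' \t':
--             i += 1
--         else:
--             j = i
--             while j < n and linea[j] not in ' \t':
--                 j += 1
--             tokens.append(linea[i:j])
--             i = j
--     return tokens
-- ===== Notes on version B (the rewrite author's own statement) =====
-- stated objective: alternative
-- what changed: Replaced the per-character accumulate/flush state machine with an index-based scanner that skips separator runs and slices out each maximal non-separator run wholesale.
import Mathlib
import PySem

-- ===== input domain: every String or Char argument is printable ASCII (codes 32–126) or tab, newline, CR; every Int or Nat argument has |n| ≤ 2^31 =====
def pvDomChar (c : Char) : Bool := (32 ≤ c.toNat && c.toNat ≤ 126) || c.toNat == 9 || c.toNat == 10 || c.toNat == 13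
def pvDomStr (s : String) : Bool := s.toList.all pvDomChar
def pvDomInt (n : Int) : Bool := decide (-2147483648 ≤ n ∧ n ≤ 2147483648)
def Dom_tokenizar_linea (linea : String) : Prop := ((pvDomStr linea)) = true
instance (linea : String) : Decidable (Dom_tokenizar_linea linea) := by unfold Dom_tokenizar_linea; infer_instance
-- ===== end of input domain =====

-- B replaces A's per-character accumulate/flush state machine by an index/run
-- scanner that slices out each maximal non-separator run; same values, same cost.

-- ===== PORT A =====
-- A's loop: state (tokens, token); token is kept as the list of its characters
-- (Python's `token + caracter` appends one character) and turned into a String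
-- exactly where A appends it to `tokens`.
def tokALoop (tokens : List String) (token : List Char) : List Char → List String
  | [] => if token.length > 0 then tokens ++ [String.mk token] else tokens
  | c :: cs =>
    if c = ' ' ∨ c = '\t' then
      tokALoop (if token.length > 0 then tokens ++ [String.mk token] else tokens) [] cs
    else
      tokALoop tokens (token ++ [c]) cs

def tokenizar_linea (linea : String) : List String :=
  tokALoop [] [] linea.toList

-- ===== PORT B =====
def pvIsSep (c : Char) : Bool := c == ' ' || c == '\t'

-- B's outer while-loop: skip a separator, or take the whole non-separator run
-- (inner while-loop + slice = takeWhile/dropWhile) and continue after it.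
def tokBLoop : List Char → List String
  | [] => []
  | c :: cs =>
    if pvIsSep c then tokBLoop cs
    else String.mk (c :: cs.takeWhile (fun x => !pvIsSep x))
           :: tokBLoop (cs.dropWhile (fun x => !pvIsSep x))
termination_by l => l.length
decreasing_by
  all_goals first
    | (simp; omega)
    | (have h := List.length_dropWhile_le (p := fun x => !pvIsSep x) (l := cs)
       simp at h ⊢; omega)
    | simp

def tokenizar_linea_alt (linea : String) : List String :=
  tokBLoop linea.toList

-- ===== PRECONDITION & SPEC =====
def Spec_tokenizar_linea (linea : String) (out : List String) : Prop := out = tokenizar_linea_alt linea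
instance (linea : String) (out : List String) : Decidable (Spec_tokenizar_linea linea out) := by unfold Spec_tokenizar_linea; infer_instance

-- ===== CLAIM (what is proved, stated in full; the proofs are below) =====
def Claim_equal_tokenizar_linea : Prop := ∀ (linea : String), Dom_tokenizar_linea linea → Spec_tokenizar_linea linea (tokenizar_linea linea)

-- ===== LEMMAS AND PROOFS =====

-- B's result when a partial token `token` (nonempty) is already in flight.
def tokBPrepend (token : List Char) (cs : List Char) : List String :=
  String.mk (token ++ cs.takeWhile (fun x => !pvIsSep x))
    :: tokBLoop (cs.dropWhile (fun x => !pvIsSep x))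

theorem main_invariant (cs : List Char) :
    ∀ (tokens : List String) (token : List Char),
      tokALoop tokens token cs =
        tokens ++ (if token = [] then tokBLoop cs else tokBPrepend token cs) := by
  induction cs with
  | nil =>
    intro tokens token
    cases token with
    | nil => simp [tokALoop, tokBLoop]
    | cons t ts => simp [tokALoop, tokBPrepend, tokBLoop]
  | cons c cs ih =>
    intro tokens token
    by_cases hsep : c = ' ' ∨ c = '\t'
    · have hb : pvIsSep c = true := by
        rcases hsep with h | h <;> simp [pvIsSep, h]
      cases token with
      | nil =>
        simp only [tokALoop, if_pos hsep]
        rw [ih]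
        simp [tokBLoop, hb]
      | cons t ts =>
        simp only [tokALoop, if_pos hsep]
        rw [ih]
        simp [tokBLoop, tokBPrepend, hb]
    · have hb : pvIsSep c = false := by
        simp [pvIsSep, not_or] at hsep ⊢
        exact hsep
      cases token with
      | nil =>
        simp only [tokALoop, if_neg hsep]
        rw [ih]
        simp [tokBLoop, tokBPrepend, hb]
      | cons t ts =>
        simp only [tokALoop, if_neg hsep]
        rw [ih]
        simp [tokBPrepend, hb]

-- ===== VERDICT (by name: the statement is the Claim_ definition above) =====
theorem tokenizar_linea_spec : Claim_equal_tokenizar_linea := by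
  intro linea _
  unfold Spec_tokenizar_linea tokenizar_linea tokenizar_linea_alt
  rw [main_invariant]
  simp
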